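-- pv_equiv track=rewrite | github.com/easythunder/gonggang | tests/integration/test_calculation.py | calculate_expected_intersection
-- ===== SOURCE A (Python) =====
-- def calculate_expected_intersection(
--     intervals_list: list
-- ) -> list:
--     """Calculate expected AND intersection for test verification.
--
--     Args:
--         intervals_list: List of interval lists for each person
--
--     Returns:
--         Expected intersection intervals (sorted)
--     """
--     if not intervals_list or not intervals_list[0]:
--         return []
--
--     result = set(intervals_list[0])
--
--     for person_intervals in intervals_list[1:]:
--         new_result = set()
--         for r_start, r_end in result:
--             for p_start, p_end in person_intervals:
--                 overlap_start = max(r_start, p_start)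
--                 overlap_end = min(r_end, p_end)
--                 if overlap_start < overlap_end:
--                     new_result.add((overlap_start, overlap_end))
--         result = new_result
--
--     return sorted(list(result))
-- ===== SOURCE B (Python) =====
-- def calculate_expected_intersection(
--     intervals_list: list
-- ) -> list:
--     """Expected AND intersection by divide and conquer: split the people in
--     half, recursively compute each half's piece-set, and merge the two sets.
--     Correct because piece-set intersection is associative: a combined piece
--     survives iff the full overlap is non-empty, which already forces every
--     sub-overlap to be non-empty."""
--     if not intervals_list or not intervals_list[0]:
--         return []
--
--     def merge(parts):
--         if len(parts) == 1:
--             return set(parts[0])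
--         mid = len(parts) // 2
--         left = merge(parts[:mid])
--         right = merge(parts[mid:])
--         return {(max(a, c), min(b, d))
--                 for a, b in left for c, d in right
--                 if max(a, c) < min(b, d)}
--
--     return sorted(merge(intervals_list))
-- ===== Notes on version B (the rewrite author's own statement) =====
-- stated objective: alternative
-- what changed: B replaces A's left-to-right fold (running piece-set refined person by person with nested add-loops) by a recursive divide-and-conquer: it splits the list of people in half, recursively intersects each half, and merges the two piece-sets with one set comprehension; correctness rests on associativity of piece-set intersection, proved in Lean.
import Mathlib
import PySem

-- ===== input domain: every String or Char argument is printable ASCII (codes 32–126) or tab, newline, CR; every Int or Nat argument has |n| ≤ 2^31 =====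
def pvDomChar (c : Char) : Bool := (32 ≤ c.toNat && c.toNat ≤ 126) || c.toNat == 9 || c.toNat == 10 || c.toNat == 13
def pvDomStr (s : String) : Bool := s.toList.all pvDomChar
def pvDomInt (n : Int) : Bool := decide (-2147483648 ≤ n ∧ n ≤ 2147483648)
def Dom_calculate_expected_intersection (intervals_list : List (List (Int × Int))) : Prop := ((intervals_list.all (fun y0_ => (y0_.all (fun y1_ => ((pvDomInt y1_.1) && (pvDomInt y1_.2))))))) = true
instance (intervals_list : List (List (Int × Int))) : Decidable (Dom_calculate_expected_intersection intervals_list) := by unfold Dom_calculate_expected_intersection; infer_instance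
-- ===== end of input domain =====

-- B replaces A's left-to-right fold over the people by a recursive divide-and-conquer on the
-- list of people, merging half-results with one set comprehension (objective: alternative).

-- ===== PORT A =====
-- inner loop 'for p_start, p_end in person_intervals: …' (body adds the clipped overlap to the set)
def pvAInner (person_intervals : List (Int × Int)) (new_result : PySem.Set (Int × Int)) (r : Int × Int) : PySem.Set (Int × Int) :=
  person_intervals.foldl (fun new_result p =>
    let overlap_start := max r.1 p.1
    let overlap_end := min r.2 p.2
    if overlap_start < overlap_end then new_result.add (overlap_start, overlap_end)
    else new_result) new_result

-- one pass of 'for r_start, r_end in result: …'.  'result' is a Python set; its hash iteration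
-- order is not modelled, but only another set is built from it and then sorted without a key,
-- so the round's result does not depend on that order: we iterate the Set's list.
def pvARound (result : PySem.Set (Int × Int)) (person_intervals : List (Int × Int)) : PySem.Set (Int × Int) :=
  result.foldl (pvAInner person_intervals) PySem.Set.empty

def calculate_expected_intersection (intervals_list : List (List (Int × Int))) : List (Int × Int) :=
  match intervals_list with
  | [] => []
  | first :: rest =>
    if first.isEmpty then []
    else
      -- sorted(list(result)): Python compares tuples lexicographically, hence the Lex key
      PySem.List.sorted (rest.foldl pvARound (PySem.Set.ofList first)) (fun x => toLex x) false

-- ===== PORT B =====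
-- the set comprehension '{(max(a,c),min(b,d)) for a,b in left for c,d in right if …}':
-- the generated (left-to-right) stream of pieces, collected into a set
def pvCombine (left right : PySem.Set (Int × Int)) : PySem.Set (Int × Int) :=
  PySem.Set.ofList (left.flatMap (fun a => right.filterMap (fun c =>
    if max a.1 c.1 < min a.2 c.2 then some (max a.1 c.1, min a.2 c.2) else none)))

-- merge(parts) of Source B.  The '[] => empty' base is a totality guard only: Source B never calls
-- merge on an empty list (the top level guards it, and both halves of a split are nonempty).
def pvMerge : List (List (Int × Int)) → PySem.Set (Int × Int)
  | [] => PySem.Set.empty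
  | [l] => PySem.Set.ofList l
  | l₁ :: l₂ :: t =>
    let parts := l₁ :: l₂ :: t
    let mid := parts.length / 2
    pvCombine (pvMerge (parts.take mid)) (pvMerge (parts.drop mid))
termination_by parts => parts.length
decreasing_by
  · simp [List.length_take]; omega
  · simp [List.length_drop]; omega

def calculate_expected_intersection_alt (intervals_list : List (List (Int × Int))) : List (Int × Int) :=
  match intervals_list with
  | [] => []
  | first :: rest =>
    if first.isEmpty then []
    else PySem.List.sorted (pvMerge (first :: rest)) (fun x => toLex x) false

-- ===== PRECONDITION & SPEC =====
def Spec_calculate_expected_intersection (intervals_list : List (List (Int × Int))) (out : List (Int × Int)) : Prop := out = calculate_expected_intersection_alt intervals_list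
instance (intervals_list : List (List (Int × Int))) (out : List (Int × Int)) : Decidable (Spec_calculate_expected_intersection intervals_list out) := by unfold Spec_calculate_expected_intersection; infer_instance

-- ===== CLAIM (what is proved, stated in full; the proofs are below) =====
def Claim_equal_calculate_expected_intersection : Prop := ∀ (intervals_list : List (List (Int × Int))), Dom_calculate_expected_intersection intervals_list → Spec_calculate_expected_intersection intervals_list (calculate_expected_intersection intervals_list)

-- ===== LEMMAS AND PROOFS =====

-- the overlap produced from pieces r and p, and when it is kept
def pvHit (r p : Int × Int) : Prop := max r.1 p.1 < min r.2 p.2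
def pvOut (r p : Int × Int) : Int × Int := (max r.1 p.1, min r.2 p.2)

-- the common semantics: x is a surviving intersection piece of the (nonempty) list of people
def pvSem : List (List (Int × Int)) → (Int × Int) → Prop
  | [], _ => False
  | [l], x => x ∈ l
  | l :: ls@(_ :: _), x => ∃ p ∈ l, ∃ y, pvSem ls y ∧ pvHit p y ∧ x = pvOut p y

-- regrouping: clipping against p first or last selects the same surviving pieces
lemma pvRegroup (r p y x : Int × Int) :
    (pvHit r p ∧ pvHit (pvOut r p) y ∧ x = pvOut (pvOut r p) y) ↔
    (pvHit p y ∧ pvHit r (pvOut p y) ∧ x = pvOut r (pvOut p y)) := by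
  obtain ⟨r1, r2⟩ := r; obtain ⟨p1, p2⟩ := p; obtain ⟨y1, y2⟩ := y; obtain ⟨x1, x2⟩ := x
  simp only [pvHit, pvOut, Prod.mk.injEq]
  omega

lemma mem_pvAInner (person : List (Int × Int)) (acc : PySem.Set (Int × Int)) (r x : Int × Int) :
    x ∈ pvAInner person acc r ↔ x ∈ acc ∨ ∃ p ∈ person, pvHit r p ∧ x = pvOut r p := by
  induction person generalizing acc with
  | nil => simp [pvAInner]
  | cons p ps ih =>
    show x ∈ pvAInner ps (if max r.1 p.1 < min r.2 p.2 then acc.add (max r.1 p.1, min r.2 p.2) else acc) r ↔ _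
    rw [ih]
    by_cases h : max r.1 p.1 < min r.2 p.2
    · rw [if_pos h, PySem.Set.mem_add]
      simp only [List.mem_cons]
      constructor
      · rintro ((hx | hx) | ⟨q, hq, hrest⟩)
        · exact Or.inl hx
        · exact Or.inr ⟨p, Or.inl rfl, h, hx⟩
        · exact Or.inr ⟨q, Or.inr hq, hrest⟩
      · rintro (hx | ⟨q, (rfl | hq), hh2, hx⟩)
        · exact Or.inl (Or.inl hx)
        · exact Or.inl (Or.inr hx)
        · exact Or.inr ⟨q, hq, hh2, hx⟩
    · rw [if_neg h]
      simp only [List.mem_cons]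
      constructor
      · rintro (hx | ⟨q, hq, hrest⟩)
        · exact Or.inl hx
        · exact Or.inr ⟨q, Or.inr hq, hrest⟩
      · rintro (hx | ⟨q, (rfl | hq), hh2, hx⟩)
        · exact Or.inl hx
        · exact absurd hh2 h
        · exact Or.inr ⟨q, hq, hh2, hx⟩

lemma nodup_pvAInner (person : List (Int × Int)) (acc : PySem.Set (Int × Int)) (r : Int × Int)
    (h : acc.Nodup) : (pvAInner person acc r).Nodup := by
  induction person generalizing acc with
  | nil => simpa [pvAInner] using h
  | cons p ps ih =>
    show (pvAInner ps (if max r.1 p.1 < min r.2 p.2 then acc.add (max r.1 p.1, min r.2 p.2) else acc) r).Nodup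
    apply ih
    split
    · exact PySem.Set.nodup_add _ _ h
    · exact h

lemma mem_pvARound (S : PySem.Set (Int × Int)) (person : List (Int × Int)) (x : Int × Int) :
    x ∈ pvARound S person ↔ ∃ r ∈ S, ∃ p ∈ person, pvHit r p ∧ x = pvOut r p := by
  unfold pvARound
  have key : ∀ (rs : List (Int × Int)) (acc : PySem.Set (Int × Int)),
      x ∈ rs.foldl (pvAInner person) acc ↔
        x ∈ acc ∨ ∃ r ∈ rs, ∃ p ∈ person, pvHit r p ∧ x = pvOut r p := by
    intro rs
    induction rs with
    | nil => simp
    | cons r rs ih =>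
      intro acc
      rw [List.foldl_cons, ih, mem_pvAInner]
      simp only [List.mem_cons]
      constructor
      · rintro ((h | ⟨p, hp, hh, hx⟩) | ⟨r', hr', hrest⟩)
        · exact Or.inl h
        · exact Or.inr ⟨r, Or.inl rfl, p, hp, hh, hx⟩
        · exact Or.inr ⟨r', Or.inr hr', hrest⟩
      · rintro (h | ⟨r', (rfl | hr'), hrest⟩)
        · exact Or.inl (Or.inl h)
        · exact Or.inl (Or.inr hrest)
        · exact Or.inr ⟨r', hr', hrest⟩
  rw [key]
  simp

lemma nodup_pvARound (S : PySem.Set (Int × Int)) (person : List (Int × Int)) :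
    (pvARound S person).Nodup := by
  unfold pvARound
  have key : ∀ (rs : List (Int × Int)) (acc : PySem.Set (Int × Int)), acc.Nodup →
      (rs.foldl (pvAInner person) acc).Nodup := by
    intro rs
    induction rs with
    | nil => intro acc h; simpa using h
    | cons r rs ih => intro acc h; exact ih _ (nodup_pvAInner _ _ _ h)
  exact key _ _ List.nodup_nil

-- A's fold, characterized by pvSem
lemma mem_foldA (ls : List (List (Int × Int))) (hls : ls ≠ []) (S : PySem.Set (Int × Int))
    (x : Int × Int) :
    x ∈ ls.foldl pvARound S ↔ ∃ r ∈ S, ∃ y, pvSem ls y ∧ pvHit r y ∧ x = pvOut r y := by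
  induction ls generalizing S with
  | nil => exact absurd rfl hls
  | cons l ls ih =>
    rw [List.foldl_cons]
    match ls with
    | [] =>
      rw [List.foldl_nil, mem_pvARound]
      simp only [pvSem]
    | l' :: ls' =>
      rw [ih (by simp)]
      simp only [pvSem]
      constructor
      · rintro ⟨r', hr', y, hy, hh, hx⟩
        rw [mem_pvARound] at hr'
        obtain ⟨r, hr, p, hp, hrp, rfl⟩ := hr'
        obtain ⟨hpy, hry, hxx⟩ := (pvRegroup r p y x).mp ⟨hrp, hh, hx⟩
        exact ⟨r, hr, pvOut p y, ⟨p, hp, y, hy, hpy, rfl⟩, hry, hxx⟩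
      · rintro ⟨r, hr, y', ⟨p, hp, y, hy, hpy, rfl⟩, hry, hx⟩
        obtain ⟨hrp, hh, hxx⟩ := (pvRegroup r p y x).mpr ⟨hpy, hry, hx⟩
        refine ⟨pvOut r p, ?_, y, hy, hh, hxx⟩
        rw [mem_pvARound]
        exact ⟨r, hr, p, hp, hrp, rfl⟩

lemma nodup_foldA (ls : List (List (Int × Int))) (S : PySem.Set (Int × Int)) (hS : S.Nodup) :
    (ls.foldl pvARound S).Nodup := by
  induction ls generalizing S with
  | nil => simpa using hS
  | cons l ls ih => exact ih _ (nodup_pvARound S l)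

-- B's combine, characterized pointwise
lemma mem_pvCombine (left right : PySem.Set (Int × Int)) (x : Int × Int) :
    x ∈ pvCombine left right ↔ ∃ a ∈ left, ∃ c ∈ right, pvHit a c ∧ x = pvOut a c := by
  unfold pvCombine
  rw [PySem.Set.mem_ofList]
  simp only [List.mem_flatMap, List.mem_filterMap, pvHit, pvOut]
  constructor
  · rintro ⟨a, ha, c, hc, hx⟩
    split at hx
    · exact ⟨a, ha, c, hc, by assumption, (Option.some.injEq _ _ ▸ hx).symm⟩
    · exact absurd hx (by simp)
  · rintro ⟨a, ha, c, hc, hh, rfl⟩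
    exact ⟨a, ha, c, hc, by rw [if_pos hh]⟩

-- pvSem splits at any point of a concatenation (associativity of piece-set intersection)
lemma pvSem_append (T1 T2 : List (List (Int × Int))) (h1 : T1 ≠ []) (h2 : T2 ≠ [])
    (x : Int × Int) :
    pvSem (T1 ++ T2) x ↔ ∃ y, pvSem T1 y ∧ ∃ z, pvSem T2 z ∧ pvHit y z ∧ x = pvOut y z := by
  induction T1 generalizing x with
  | nil => exact absurd rfl h1
  | cons l T1' ih =>
    match T1' with
    | [] =>
      match T2, h2 with
      | l2 :: T2', _ =>
        show pvSem (l :: l2 :: T2') x ↔ _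
        simp only [pvSem]
    | l' :: T1'' =>
      match T2, h2 with
      | l2 :: T2', _ =>
        show pvSem (l :: ((l' :: T1'') ++ (l2 :: T2'))) x ↔ _
        have hcons : ∀ (w : Int × Int), pvSem (l :: l' :: T1'') w ↔
            ∃ p ∈ l, ∃ y, pvSem (l' :: T1'') y ∧ pvHit p y ∧ w = pvOut p y := by
          intro w; simp only [pvSem]
        have hstep : pvSem (l :: ((l' :: T1'') ++ (l2 :: T2'))) x ↔
            ∃ p ∈ l, ∃ w, pvSem ((l' :: T1'') ++ (l2 :: T2')) w ∧ pvHit p w ∧ x = pvOut p w := by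
          simp only [List.cons_append, pvSem]
        rw [hstep]
        constructor
        · rintro ⟨p, hp, w, hw, hpw, hx⟩
          obtain ⟨y, hy, z, hz, hyz, rfl⟩ := (ih (by simp) w).mp hw
          obtain ⟨hpy, hout, hxx⟩ := ((pvRegroup p y z x).mpr ⟨hyz, hpw, hx⟩)
          exact ⟨pvOut p y, (hcons _).mpr ⟨p, hp, y, hy, hpy, rfl⟩, z, hz, hout, hxx⟩
        · rintro ⟨y', hy', z, hz, hyz, hx⟩
          obtain ⟨p, hp, y, hy, hpy, rfl⟩ := (hcons _).mp hy'
          obtain ⟨hyz', hpw, hxx⟩ := (pvRegroup p y z x).mp ⟨hpy, hyz, hx⟩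
          exact ⟨p, hp, pvOut y z, (ih (by simp) _).mpr ⟨y, hy, z, hz, hyz', rfl⟩, hpw, hxx⟩

lemma nodup_pvMerge (parts : List (List (Int × Int))) : (pvMerge parts).Nodup := by
  match parts with
  | [] => rw [pvMerge]; exact List.nodup_nil
  | [l] => rw [pvMerge]; exact PySem.Set.nodup_ofList l
  | l₁ :: l₂ :: t =>
    rw [pvMerge]
    exact PySem.Set.nodup_ofList _

lemma mem_pvMerge (parts : List (List (Int × Int))) (hp : parts ≠ []) (x : Int × Int) :
    x ∈ pvMerge parts ↔ pvSem parts x := by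
  match parts with
  | [l] =>
    rw [pvMerge]
    simp only [pvSem]
    exact PySem.Set.mem_ofList l x
  | l₁ :: l₂ :: t =>
    have hlen : (l₁ :: l₂ :: t).length / 2 ≥ 1 ∧ (l₁ :: l₂ :: t).length / 2 < (l₁ :: l₂ :: t).length := by
      simp; omega
    have htake : (l₁ :: l₂ :: t).take ((l₁ :: l₂ :: t).length / 2) ≠ [] := by
      cases h : (l₁ :: l₂ :: t).take ((l₁ :: l₂ :: t).length / 2) with
      | cons _ _ => simp
      | nil =>
        have := congrArg List.length h
        simp [List.length_take] at this
    have hdrop : (l₁ :: l₂ :: t).drop ((l₁ :: l₂ :: t).length / 2) ≠ [] := by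
      cases h : (l₁ :: l₂ :: t).drop ((l₁ :: l₂ :: t).length / 2) with
      | cons _ _ => simp
      | nil =>
        have := congrArg List.length h
        simp [List.length_drop] at this
        omega
    rw [pvMerge]
    rw [mem_pvCombine]
    have hsplit := pvSem_append ((l₁ :: l₂ :: t).take ((l₁ :: l₂ :: t).length / 2))
      ((l₁ :: l₂ :: t).drop ((l₁ :: l₂ :: t).length / 2)) htake hdrop x
    rw [List.take_append_drop] at hsplit
    rw [hsplit]
    constructor
    · rintro ⟨a, ha, c, hc, h⟩
      exact ⟨a, (mem_pvMerge _ htake a).mp ha, c, (mem_pvMerge _ hdrop c).mp hc, h⟩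
    · rintro ⟨a, ha, c, hc, h⟩
      exact ⟨a, (mem_pvMerge _ htake a).mpr ha, c, (mem_pvMerge _ hdrop c).mpr hc, h⟩
termination_by parts.length
decreasing_by
  all_goals simp [List.length_take, List.length_drop]; omega

-- the two piece-sets coincide, hence so do their sorted lists
lemma pvSets_eq (first : List (Int × Int)) (rest : List (List (Int × Int))) :
    PySem.List.sorted (rest.foldl pvARound (PySem.Set.ofList first)) (fun x => toLex x) false
      = PySem.List.sorted (pvMerge (first :: rest)) (fun x => toLex x) false := by
  apply PySem.List.sorted_eq_sorted_of_perm _ _ _ (Equiv.injective _)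
  refine (List.perm_ext_iff_of_nodup ?_ (nodup_pvMerge _)).mpr ?_
  · exact nodup_foldA rest _ (PySem.Set.nodup_ofList first)
  intro x
  rw [mem_pvMerge _ (by simp)]
  match rest with
  | [] =>
    simp only [List.foldl_nil, pvSem]
    exact PySem.Set.mem_ofList first x
  | l' :: rest' =>
    rw [mem_foldA _ (by simp)]
    simp only [pvSem, PySem.Set.mem_ofList]

-- ===== VERDICT (by name: the statement is the Claim_ definition above) =====
theorem calculate_expected_intersection_spec : Claim_equal_calculate_expected_intersection := by
  intro intervals_list _
  unfold Spec_calculate_expected_intersection calculate_expected_intersection calculate_expected_intersection_alt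
  rcases intervals_list with _ | ⟨first, rest⟩
  · rfl
  · by_cases h : first.isEmpty
    · simp [h]
    · simp only [h, Bool.false_eq_true, if_false]
      exact pvSets_eq first rest
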